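-- pv_equiv track=rewrite | github.com/kkw2758/Programmers | Algorithm/BFS/LEVEL2/석유 시추.py | solution
-- ===== SOURCE A (Python) =====
-- from collections import deque
-- from collections import deque
-- from collections import deque, defaultdict
-- from collections import deque, defaultdict
--
-- def solution(land):
--   answer = 0
--   n = len(land)
--   m = len(land[0])
--   dx = [-1, 1, 0, 0]
--   dy = [0, 0, -1, 1]
--   result = [0 for m in range(m)]
--   visited = [[0] * m for _ in range(n)]
--
--   def bfs(a, b):
--     count = 0
--     visited[a][b] = 1
--     q = deque()
--     q.append((a, b))
--     min_y, max_y = b, b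
--     while q:
--       x, y = q.popleft()
--       min_y = min(min_y, y)
--       max_y = max(max_y, y)
--       count += 1
--       for i in range(4):
--         nx = x + dx[i]
--         ny = y + dy[i]
--         if nx < 0 or ny < 0 or nx >= n or ny >= m:
--           continue
--         if visited[nx][ny] == 0 and land[nx][ny] == 1:
--           visited[nx][ny] = 1
--           q.append((nx, ny))
--     for i in range(min_y, max_y + 1):
--       result[i] += count
--
--   for i in range(n):
--     for j in range(m):
--       if visited[i][j] == 0 and land[i][j] == 1:
--         bfs(i, j)
--
--   answer = max(result)
--
--   return answer
-- ===== SOURCE B (Python) =====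
-- def solution(land):
--     n = len(land)
--     m = len(land[0])
--     seen = set()
--     comps = []  # per component: (cell count, min column, max column)
--     for i in range(n):
--         for j in range(m):
--             if (i, j) not in seen and land[i][j] == 1:
--                 seen.add((i, j))
--                 stack = [(i, j)]
--                 cols = []
--                 while stack:
--                     x, y = stack.pop()
--                     cols.append(y)
--                     for nx, ny in ((x - 1, y), (x + 1, y), (x, y - 1), (x, y + 1)):
--                         if 0 <= nx < n and 0 <= ny < m and (nx, ny) not in seen and land[nx][ny] == 1:
--                             seen.add((nx, ny))
--                             stack.append((nx, ny))
--                 comps.append((len(cols), min(cols), max(cols)))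
--     return max(sum(c for (c, lo, hi) in comps if lo <= col <= hi) for col in range(m))
-- ===== Notes on version B (the rewrite author's own statement) =====
-- stated objective: alternative
-- what changed: A's queue-BFS with a mutable visited matrix and an incremental per-column result array is replaced by a stack-DFS over a seen-set that collects each component's column list, summarises each component to a (size, min-col, max-col) triple, and computes the answer as a per-column maximum of filtered sums over those triples.
-- outside the precondition, e.g. on solution([]): A raises IndexError, B raises IndexError; on solution([[]]): A raises ValueError, B raises ValueError; on solution([[1, 1], [1]]): A raises IndexError, B raises IndexError
import Mathlib
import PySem

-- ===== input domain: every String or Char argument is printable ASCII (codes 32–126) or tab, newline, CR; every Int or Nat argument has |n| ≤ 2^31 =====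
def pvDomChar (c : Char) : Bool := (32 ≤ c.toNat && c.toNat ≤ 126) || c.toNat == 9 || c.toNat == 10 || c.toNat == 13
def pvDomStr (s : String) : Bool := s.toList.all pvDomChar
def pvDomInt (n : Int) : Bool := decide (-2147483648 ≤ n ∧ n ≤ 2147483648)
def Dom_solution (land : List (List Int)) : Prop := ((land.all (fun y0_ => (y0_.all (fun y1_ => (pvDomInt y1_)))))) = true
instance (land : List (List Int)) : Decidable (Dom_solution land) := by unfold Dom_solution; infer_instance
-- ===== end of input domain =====

-- B replaces A's queue-BFS + visited matrix + incremental result array by a stack-DFS over a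
-- seen-set collecting per-component (size, min-col, max-col) triples and a per-column max of sums
-- (objective: alternative decomposition; equivalence of the RETURN value is what is proved).

-- ===== PORT A =====
-- land[x][y]: only ever evaluated under the loops' bounds guards (0 ≤ x < n, 0 ≤ y < m),
-- where pyGetD is exact on the rectangular grids Pre_solution admits.
def pvLandAt (land : List (List Int)) (x y : Int) : Int :=
  PySem.List.pyGetD (PySem.List.pyGetD land x []) y 0

def pvGetV (v : List (List Int)) (a b : Int) : Int :=
  PySem.List.pyGetD (PySem.List.pyGetD v a []) b 0

def pvSetV (v : List (List Int)) (a b : Int) : List (List Int) :=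
  PySem.List.pySetD v a (PySem.List.pySetD (PySem.List.pyGetD v a []) b 1)

def pvDirs : List (Int × Int) := [(-1, 0), (1, 0), (0, -1), (0, 1)]

-- the 'for i in range(4)' neighbour scan of A's bfs
def pvScanA (land : List (List Int)) (n m x y : Int)
    (vq : List (List Int) × List (Int × Int)) : List (List Int) × List (Int × Int) :=
  pvDirs.foldl (fun vq d =>
    let nx := x + d.1
    let ny := y + d.2
    if nx < 0 ∨ ny < 0 ∨ nx ≥ n ∨ ny ≥ m then vq
    else if pvGetV vq.1 nx ny = 0 ∧ pvLandAt land nx ny = 1 then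
      (pvSetV vq.1 nx ny, vq.2 ++ [(nx, ny)])
    else vq) vq

-- A's 'while q' loop; fuel n*m+1 is never exhausted (at most n*m cells are ever enqueued)
def pvBFSLoop (land : List (List Int)) (n m : Int) :
    Nat → List (List Int) → List (Int × Int) → Int → Int → Int →
    List (List Int) × Int × Int × Int
  | 0, v, _, count, mn, mx => (v, count, mn, mx)
  | _ + 1, v, [], count, mn, mx => (v, count, mn, mx)
  | fuel + 1, v, (x, y) :: q, count, mn, mx =>
    let vq := pvScanA land n m x y (v, q)
    pvBFSLoop land n m fuel vq.1 vq.2 (count + 1) (min mn y) (max mx y)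

def pvBFS (land : List (List Int)) (n m a b : Int) (v : List (List Int)) :
    List (List Int) × Int × Int × Int :=
  pvBFSLoop land n m (n.toNat * m.toNat + 1) (pvSetV v a b) [(a, b)] 0 b b

-- 'for i in range(min_y, max_y + 1): result[i] += count'
def pvAddRange (result : List Int) (mn mx count : Int) : List Int :=
  (PySem.List.pyRange mn (mx + 1) 1).foldl
    (fun res i => PySem.List.pySetD res i (PySem.List.pyGetD res i 0 + count)) result

def solution (land : List (List Int)) : Int :=
  let n : Int := land.length
  let m : Int := ((PySem.List.pyGet? land 0).getD []).length
  let result : List Int := (PySem.List.pyRange 0 m 1).map (fun _ => (0 : Int))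
  let visited : List (List Int) :=
    (PySem.List.pyRange 0 n 1).map (fun _ => (PySem.List.pyRange 0 m 1).map (fun _ => (0 : Int)))
  let vr := (PySem.List.pyRange 0 n 1).foldl (fun vr i =>
    (PySem.List.pyRange 0 m 1).foldl (fun (vr : List (List Int) × List Int) j =>
      if pvGetV vr.1 i j = 0 ∧ pvLandAt land i j = 1 then
        let r := pvBFS land n m i j vr.1
        (r.1, pvAddRange vr.2 r.2.2.1 r.2.2.2 r.2.1)
      else vr) vr) (visited, result)
  (PySem.List.max? vr.2 (fun y => y)).getD 0

-- ===== PORT B =====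
def pvNbrs (x y : Int) : List (Int × Int) := [(x - 1, y), (x + 1, y), (x, y - 1), (x, y + 1)]

-- B's 'while stack' loop (pop from the END = Python list.pop()); same never-exhausted fuel
def pvDFSLoop (land : List (List Int)) (n m : Int) :
    Nat → PySem.Set (Int × Int) → List (Int × Int) → List Int →
    PySem.Set (Int × Int) × List Int
  | 0, seen, _, cols => (seen, cols)
  | _ + 1, seen, [], cols => (seen, cols)
  | fuel + 1, seen, c :: st, cols =>
    let p := (c :: st).getLast (by simp)
    let ss := (pvNbrs p.1 p.2).foldl
      (fun (ss : PySem.Set (Int × Int) × List (Int × Int)) c =>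
        if 0 ≤ c.1 ∧ c.1 < n ∧ 0 ≤ c.2 ∧ c.2 < m ∧ c ∉ ss.1 ∧ pvLandAt land c.1 c.2 = 1 then
          (PySem.Set.add ss.1 c, ss.2 ++ [c])
        else ss) (seen, (c :: st).dropLast)
    pvDFSLoop land n m fuel ss.1 ss.2 (cols ++ [p.2])

def solution_alt (land : List (List Int)) : Int :=
  let n : Int := land.length
  let m : Int := ((PySem.List.pyGet? land 0).getD []).length
  let sc := (PySem.List.pyRange 0 n 1).foldl (fun sc i =>
    (PySem.List.pyRange 0 m 1).foldl
      (fun (sc : PySem.Set (Int × Int) × List (Int × Int × Int)) j =>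
        if (i, j) ∉ sc.1 ∧ pvLandAt land i j = 1 then
          let r := pvDFSLoop land n m (n.toNat * m.toNat + 1)
            (PySem.Set.add sc.1 (i, j)) [(i, j)] []
          (r.1, sc.2 ++ [((r.2.length : Int),
            (PySem.List.min? r.2 (fun y => y)).getD 0,
            (PySem.List.max? r.2 (fun y => y)).getD 0)])
        else sc) sc) (PySem.Set.empty, ([] : List (Int × Int × Int)))
  (PySem.List.max? ((PySem.List.pyRange 0 m 1).map (fun col =>
    ((sc.2.filter (fun t => decide (t.2.1 ≤ col ∧ col ≤ t.2.2))).map (fun t => t.1)).sum))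
    (fun y => y)).getD 0

-- ===== PRECONDITION & SPEC =====
-- Pre_solution holds exactly where the Python A returns normally: land nonempty (else land[0] is an
-- IndexError), a positive first-row width m (else max([]) is a ValueError), and every row at least
-- m wide (a shorter row is always eventually indexed at column ≥ its length: IndexError).
def Pre_solution (land : List (List Int)) : Prop :=
  land ≠ [] ∧ 0 < ((PySem.List.pyGet? land 0).getD []).length ∧
    ∀ row ∈ land, ((PySem.List.pyGet? land 0).getD []).length ≤ row.length
instance (land : List (List Int)) : Decidable (Pre_solution land) := by
  unfold Pre_solution; infer_instance

def pvWitness_solution : List (List Int) := [[1, 0], [1, 1]]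

def Spec_solution (land : List (List Int)) (out : Int) : Prop := out = solution_alt land
instance (land : List (List Int)) (out : Int) : Decidable (Spec_solution land out) := by
  unfold Spec_solution; infer_instance

-- ===== CLAIM (what is proved, stated in full; the proofs are below) =====
def Claim_equal_solution : Prop :=
  ∀ (land : List (List Int)), Dom_solution land → Pre_solution land →
    Spec_solution land (solution land)

-- ===== LEMMAS AND PROOFS =====

-- oil cell (in bounds and land value 1)
def pvO (land : List (List Int)) (n m : Int) (c : Int × Int) : Prop :=
  0 ≤ c.1 ∧ c.1 < n ∧ 0 ≤ c.2 ∧ c.2 < m ∧ pvLandAt land c.1 c.2 = 1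

-- 4-adjacency
def pvAdj (c d : Int × Int) : Prop := d ∈ pvNbrs c.1 c.2

-- connectivity through oil cells
def pvReach (land : List (List Int)) (n m : Int) (s c : Int × Int) : Prop :=
  Relation.ReflTransGen (fun a b => pvAdj a b ∧ pvO land n m b) s c

def pvGrid (n m : Int) : Finset (Int × Int) :=
  (Finset.range n.toNat ×ˢ Finset.range m.toNat).image (fun p => ((p.1 : Int), (p.2 : Int)))

-- one neighbour-processing step, shared abstraction of both ports' scans
def pvStepG (land : List (List Int)) (n m : Int)
    (Sq : Finset (Int × Int) × List (Int × Int)) (c : Int × Int) :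
    Finset (Int × Int) × List (Int × Int) :=
  if (0 ≤ c.1 ∧ c.1 < n ∧ 0 ≤ c.2 ∧ c.2 < m ∧ pvLandAt land c.1 c.2 = 1) ∧ c ∉ Sq.1 then
    (insert c Sq.1, Sq.2 ++ [c])
  else Sq

-- the abstract worklist loop, parametric in the pop policy
def pvGLoop (land : List (List Int)) (n m : Int)
    (pop : List (Int × Int) → (Int × Int) × List (Int × Int)) :
    Nat → Finset (Int × Int) → List (Int × Int) → List (Int × Int) →
    Finset (Int × Int) × List (Int × Int)
  | 0, S, _, P => (S, P)
  | _ + 1, S, [], P => (S, P)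
  | fuel + 1, S, c :: t, P =>
    let p := pop (c :: t)
    let Sq := (pvNbrs p.1.1 p.1.2).foldl (pvStepG land n m) (S, p.2)
    pvGLoop land n m pop fuel Sq.1 Sq.2 (P ++ [p.1])

def pvPopF (l : List (Int × Int)) : (Int × Int) × List (Int × Int) := (l.headD (0, 0), l.tail)
def pvPopB (l : List (Int × Int)) : (Int × Int) × List (Int × Int) := (l.getLastD (0, 0), l.dropLast)

-- visited matrix denoting a set of cells
def pvMkV (n m : Int) (S : Finset (Int × Int)) : List (List Int) :=
  (List.range n.toNat).map (fun (i : Nat) =>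
    (List.range m.toNat).map (fun (j : Nat) => if ((i : Int), (j : Int)) ∈ S then 1 else 0))

def pvColSum (comps : List (Int × Int × Int)) (col : Int) : Int :=
  ((comps.filter (fun t => decide (t.2.1 ≤ col ∧ col ≤ t.2.2))).map (fun t => t.1)).sum

-- basic facts about the grid, adjacency and reachability

lemma mem_pvGrid {n m : Int} {c : Int × Int} :
    c ∈ pvGrid n m ↔ 0 ≤ c.1 ∧ c.1 < n ∧ 0 ≤ c.2 ∧ c.2 < m := by
  rcases c with ⟨a, b⟩
  simp only [pvGrid, Finset.mem_image, Finset.mem_product, Finset.mem_range, Prod.mk.injEq]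
  constructor
  · rintro ⟨⟨i, j⟩, ⟨hi, hj⟩, h1, h2⟩
    omega
  · rintro ⟨h1, h2, h3, h4⟩
    exact ⟨(a.toNat, b.toNat), ⟨by omega, by omega⟩, by omega, by omega⟩

lemma card_pvGrid (n m : Int) : (pvGrid n m).card = n.toNat * m.toNat := by
  rw [pvGrid, Finset.card_image_of_injective _ (by
    intro p q h
    simp only [Prod.mk.injEq] at h
    exact Prod.ext (by exact_mod_cast h.1) (by exact_mod_cast h.2))]
  simp

lemma pvO_grid {land : List (List Int)} {n m : Int} {c : Int × Int}
    (h : pvO land n m c) : c ∈ pvGrid n m := by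
  rw [mem_pvGrid]; exact ⟨h.1, h.2.1, h.2.2.1, h.2.2.2.1⟩

lemma pvAdj_symm {c d : Int × Int} (h : pvAdj c d) : pvAdj d c := by
  rcases c with ⟨a, b⟩
  simp only [pvAdj, pvNbrs, List.mem_cons, List.not_mem_nil, or_false] at h ⊢
  rcases h with rfl | rfl | rfl | rfl <;> simp [Prod.mk.injEq]

lemma pvReach_O {land : List (List Int)} {n m : Int} {s c : Int × Int}
    (hs : pvO land n m s) (h : pvReach land n m s c) : pvO land n m c := by
  induction h with
  | refl => exact hs
  | tail _ hstep _ => exact hstep.2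

lemma pvReach_V₀ {land : List (List Int)} {n m : Int} {V₀ : Finset (Int × Int)} {s c : Int × Int}
    (hV₀ : ∀ a ∈ V₀, ∀ b, pvAdj a b → pvO land n m b → b ∈ V₀)
    (hOs : pvO land n m s) (h : pvReach land n m s c) (hc : c ∈ V₀) : s ∈ V₀ := by
  induction h with
  | refl => exact hc
  | @tail b c hR hstep ih =>
    exact ih (hV₀ c hc b (pvAdj_symm hstep.1) (pvReach_O hOs hR))

-- characterisation of the shared neighbour-processing fold

lemma stepG_spec (land : List (List Int)) (n m : Int) :
    ∀ (L : List (Int × Int)) (S : Finset (Int × Int)) (q : List (Int × Int)),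
    ∃ new : List (Int × Int),
      L.foldl (pvStepG land n m) (S, q) = (S ∪ new.toFinset, q ++ new) ∧ new.Nodup ∧
      (∀ c ∈ new, c ∈ L ∧ pvO land n m c ∧ c ∉ S) ∧
      (∀ c ∈ L, pvO land n m c → c ∈ S ∪ new.toFinset) := by
  intro L
  induction L with
  | nil => intro S q; exact ⟨[], by simp, by simp, by simp, by simp⟩
  | cons c L ih =>
    intro S q
    by_cases hc : (0 ≤ c.1 ∧ c.1 < n ∧ 0 ≤ c.2 ∧ c.2 < m ∧ pvLandAt land c.1 c.2 = 1) ∧ c ∉ S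
    · have hstep : pvStepG land n m (S, q) c = (insert c S, q ++ [c]) := by
        simp [pvStepG, hc]
      obtain ⟨new, heq, hnd, hprop, hcov⟩ := ih (insert c S) (q ++ [c])
      have hcnew : c ∉ new := fun hmem => (hprop c hmem).2.2 (Finset.mem_insert_self c S)
      refine ⟨c :: new, ?_, List.Nodup.cons hcnew hnd, ?_, ?_⟩
      · rw [List.foldl_cons, hstep, heq]
        refine Prod.ext ?_ (by simp)
        show insert c S ∪ new.toFinset = S ∪ (c :: new).toFinset
        simp [Finset.union_insert, Finset.insert_union]
      · intro x hx
        rcases List.mem_cons.mp hx with rfl | hx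
        · exact ⟨by simp, hc.1, hc.2⟩
        · obtain ⟨h1, h2, h3⟩ := hprop x hx
          exact ⟨List.mem_cons_of_mem _ h1, h2, fun hxS => h3 (Finset.mem_insert_of_mem hxS)⟩
      · intro x hx hO
        rcases List.mem_cons.mp hx with rfl | hx
        · exact Finset.mem_union_right _ (by simp)
        · have h := hcov x hx hO
          rcases Finset.mem_union.mp h with h | h
          · rcases Finset.mem_insert.mp h with rfl | h
            · exact Finset.mem_union_right _ (by simp)
            · exact Finset.mem_union_left _ h
          · exact Finset.mem_union_right _ (by simp [List.mem_toFinset.mp h])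
    · have hstep : pvStepG land n m (S, q) c = (S, q) := by
        simp only [pvStepG]; rw [if_neg hc]
      obtain ⟨new, heq, hnd, hprop, hcov⟩ := ih S q
      refine ⟨new, by rw [List.foldl_cons, hstep]; exact heq, hnd, ?_, ?_⟩
      · intro x hx
        obtain ⟨h1, h2, h3⟩ := hprop x hx
        exact ⟨List.mem_cons_of_mem _ h1, h2, h3⟩
      · intro x hx hO
        rcases List.mem_cons.mp hx with rfl | hx
        · have hxS : x ∈ S := by
            by_contra hxS
            exact hc ⟨⟨hO.1, hO.2.1, hO.2.2.1, hO.2.2.2.1, hO.2.2.2.2⟩, hxS⟩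
          exact Finset.mem_union_left _ hxS
        · exact hcov x hx hO

-- the processed-prefix of the abstract loop factors out

lemma gloop_factor (land : List (List Int)) (n m : Int)
    (pop : List (Int × Int) → (Int × Int) × List (Int × Int)) :
    ∀ (fuel : Nat) (S : Finset (Int × Int)) (q P : List (Int × Int)),
    pvGLoop land n m pop fuel S q P =
      ((pvGLoop land n m pop fuel S q []).1, P ++ (pvGLoop land n m pop fuel S q []).2) := by
  intro fuel
  induction fuel with
  | zero => intro S q P; simp [pvGLoop]
  | succ fuel ih =>
    intro S q P
    cases q with
    | nil => simp [pvGLoop]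
    | cons c t =>
      simp only [pvGLoop]
      rw [ih _ _ (P ++ [(pop (c :: t)).1]), ih _ _ ([] ++ [(pop (c :: t)).1])]
      simp

-- invariant of the abstract worklist loop
structure pvInv (land : List (List Int)) (n m : Int) (V₀ : Finset (Int × Int)) (s : Int × Int)
    (S : Finset (Int × Int)) (q P : List (Int × Int)) : Prop where
  hq : ∀ c ∈ q, c ∈ S
  hnd : (P ++ q).Nodup
  hSiff : ∀ c, c ∈ S ↔ c ∈ V₀ ∨ c ∈ P ∨ c ∈ q
  hnV : ∀ c ∈ P ++ q, c ∉ V₀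
  hP : ∀ c ∈ P, ∀ d, pvAdj c d → pvO land n m d → d ∈ S
  hR : ∀ c ∈ P ++ q, pvReach land n m s c
  hO : ∀ c ∈ P ++ q, pvO land n m c
  hsS : s ∈ S

-- the main worklist theorem: whatever the pop policy, the loop terminates with the component
lemma gloop_spec (land : List (List Int)) (n m : Int) (V₀ : Finset (Int × Int)) (s : Int × Int)
    (pop : List (Int × Int) → (Int × Int) × List (Int × Int))
    (hpop : ∀ (c : Int × Int) (t : List (Int × Int)),
      ((pop (c :: t)).1 :: (pop (c :: t)).2).Perm (c :: t))
    (hV₀ : ∀ a ∈ V₀, ∀ b, pvAdj a b → pvO land n m b → b ∈ V₀)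
    (hsV : s ∉ V₀) (hOs : pvO land n m s) :
    ∀ (fuel : Nat) (S : Finset (Int × Int)) (q P : List (Int × Int)),
    pvInv land n m V₀ s S q P →
    q.length + (pvGrid n m \ S).card < fuel →
    ∃ Sf Pf, pvGLoop land n m pop fuel S q P = (Sf, Pf) ∧ Pf.Nodup ∧
      (∀ c, c ∈ Pf ↔ pvReach land n m s c) ∧
      (∀ c, c ∈ Sf ↔ c ∈ V₀ ∨ pvReach land n m s c) := by
  intro fuel
  induction fuel with
  | zero => intro S q P _ hfuel; omega
  | succ fuel ih =>
    intro S q P inv hfuel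
    cases q with
    | nil =>
      have hSP : ∀ x, x ∈ S ↔ x ∈ V₀ ∨ x ∈ P := fun x => by simpa using inv.hSiff x
      have hSreach : ∀ x, pvReach land n m s x → x ∈ S := by
        intro x h
        induction h with
        | refl => exact inv.hsS
        | @tail b c hR hstep ihh =>
          rcases (hSP b).mp ihh with hb | hb
          · exact (hSP c).mpr (Or.inl (hV₀ b hb c hstep.1 hstep.2))
          · rcases (inv.hSiff b).mp ((hSP b).mpr (Or.inr hb)) with h' | h' | h'
            · exact (hSP c).mpr (Or.inl (hV₀ b h' c hstep.1 hstep.2))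
            · exact inv.hP b h' c hstep.1 hstep.2
            · exact absurd h' (by simp)
      have hPiff : ∀ x, x ∈ P ↔ pvReach land n m s x := by
        intro x
        constructor
        · intro hx; exact inv.hR x (by simpa using hx)
        · intro hx
          rcases (hSP x).mp (hSreach x hx) with hx' | hx'
          · exact absurd (pvReach_V₀ hV₀ hOs hx hx') hsV
          · exact hx'
      exact ⟨S, P, by simp [pvGLoop], by simpa using inv.hnd, hPiff,
        fun x => by rw [hSP x, hPiff x]⟩
    | cons c t =>
      have hperm := hpop c t
      obtain ⟨new, heq, hndnew, hnew, hcov⟩ :=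
        stepG_spec land n m (pvNbrs (pop (c :: t)).1.1 (pop (c :: t)).1.2) S (pop (c :: t)).2
      have hqmem : ∀ x, x ∈ c :: t ↔ x = (pop (c :: t)).1 ∨ x ∈ (pop (c :: t)).2 := fun x => by
        rw [← hperm.mem_iff]; simp
      have hp1q : (pop (c :: t)).1 ∈ c :: t := (hqmem _).mpr (Or.inl rfl)
      have hp1S : (pop (c :: t)).1 ∈ S := inv.hq _ hp1q
      have hPsubS : ∀ x ∈ P, x ∈ S := fun x hx => (inv.hSiff x).mpr (Or.inr (Or.inl hx))
      have hnewS : ∀ x ∈ new, x ∉ S := fun x hx => (hnew x hx).2.2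
      have hnewO : ∀ x ∈ new, pvO land n m x := fun x hx => (hnew x hx).2.1
      have hnewAdj : ∀ x ∈ new, pvAdj (pop (c :: t)).1 x := fun x hx => (hnew x hx).1
      have hV₀subS : ∀ x ∈ V₀, x ∈ S := fun x hx => (inv.hSiff x).mpr (Or.inl hx)
      have inv' : pvInv land n m V₀ s (S ∪ new.toFinset)
          ((pop (c :: t)).2 ++ new) (P ++ [(pop (c :: t)).1]) := by
        constructor
        · intro x hx
          rcases List.mem_append.mp hx with hx | hx
          · exact Finset.mem_union_left _ (inv.hq x ((hqmem x).mpr (Or.inr hx)))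
          · exact Finset.mem_union_right _ (List.mem_toFinset.mpr hx)
        · have e1 : (P ++ [(pop (c :: t)).1]) ++ ((pop (c :: t)).2 ++ new)
              = (P ++ ((pop (c :: t)).1 :: (pop (c :: t)).2)) ++ new := by simp
          rw [e1]
          refine List.Nodup.append ?_ hndnew ?_
          · exact (List.Perm.append_left P hperm.symm).nodup inv.hnd
          · intro x hx1 hx2
            rcases List.mem_append.mp hx1 with hx | hx
            · exact hnewS x hx2 (hPsubS x hx)
            · exact hnewS x hx2 (inv.hq x (hperm.mem_iff.mp hx))
        · intro x
          have h1 := hqmem x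
          have h2 := inv.hSiff x
          simp only [Finset.mem_union, List.mem_toFinset, List.mem_append,
            List.mem_singleton] at *
          tauto
        · intro x hx
          rcases List.mem_append.mp hx with hx | hx
          · rcases List.mem_append.mp hx with hx | hx
            · exact inv.hnV x (by simp [hx])
            · have hxe : x = (pop (c :: t)).1 := by simpa using hx
              rw [hxe]
              exact inv.hnV _ (List.mem_append.mpr (Or.inr hp1q))
          · rcases List.mem_append.mp hx with hx | hx
            · exact inv.hnV x (by simp [(hqmem x).mpr (Or.inr hx)])
            · exact fun hV => hnewS x hx (hV₀subS x hV)
        · intro x hx d hadj hOd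
          rcases List.mem_append.mp hx with hx | hx
          · exact Finset.mem_union_left _ (inv.hP x hx d hadj hOd)
          · have hxe : x = (pop (c :: t)).1 := by simpa using hx
            rw [hxe] at hadj
            exact hcov d hadj hOd
        · intro x hx
          rcases List.mem_append.mp hx with hx | hx
          · rcases List.mem_append.mp hx with hx | hx
            · exact inv.hR x (by simp [hx])
            · have hxe : x = (pop (c :: t)).1 := by simpa using hx
              rw [hxe]
              exact inv.hR _ (List.mem_append.mpr (Or.inr hp1q))
          · rcases List.mem_append.mp hx with hx | hx
            · exact inv.hR x (by simp [(hqmem x).mpr (Or.inr hx)])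
            · exact (inv.hR _ (List.mem_append.mpr (Or.inr hp1q))).tail
                ⟨hnewAdj x hx, hnewO x hx⟩
        · intro x hx
          rcases List.mem_append.mp hx with hx | hx
          · rcases List.mem_append.mp hx with hx | hx
            · exact inv.hO x (by simp [hx])
            · have hxe : x = (pop (c :: t)).1 := by simpa using hx
              rw [hxe]
              exact inv.hO _ (List.mem_append.mpr (Or.inr hp1q))
          · rcases List.mem_append.mp hx with hx | hx
            · exact inv.hO x (by simp [(hqmem x).mpr (Or.inr hx)])
            · exact hnewO x hx
        · exact Finset.mem_union_left _ inv.hsS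
      have hlen : (pop (c :: t)).2.length + 1 = (c :: t).length := by
        have := hperm.length_eq
        simpa using this
      have hNsub : new.toFinset ⊆ pvGrid n m \ S := by
        intro x hx
        rw [List.mem_toFinset] at hx
        exact Finset.mem_sdiff.mpr ⟨pvO_grid (hnewO x hx), hnewS x hx⟩
      have hsd : pvGrid n m \ (S ∪ new.toFinset) = (pvGrid n m \ S) \ new.toFinset := by
        ext z
        simp only [Finset.mem_sdiff, Finset.mem_union]
        tauto
      have hcard : (pvGrid n m \ (S ∪ new.toFinset)).card
          = (pvGrid n m \ S).card - new.length := by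
        rw [hsd, Finset.card_sdiff, Finset.inter_eq_left.mpr hNsub,
          List.toFinset_card_of_nodup hndnew]
      have hk : new.length ≤ (pvGrid n m \ S).card := by
        have := Finset.card_le_card hNsub
        rwa [List.toFinset_card_of_nodup hndnew] at this
      have hmeas : ((pop (c :: t)).2 ++ new).length
          + (pvGrid n m \ (S ∪ new.toFinset)).card < fuel := by
        rw [List.length_append, hcard]
        have hpl := hperm.length_eq
        simp only [List.length_cons] at hpl hfuel
        omega
      obtain ⟨Sf, Pf, hrun, h1, h2, h3⟩ := ih (S ∪ new.toFinset)
        ((pop (c :: t)).2 ++ new) (P ++ [(pop (c :: t)).1]) inv' hmeas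
      refine ⟨Sf, Pf, ?_, h1, h2, h3⟩
      simp only [pvGLoop]
      rw [heq]
      exact hrun

-- coupling the visited matrix with a finite set of cells

lemma pvMkV_length (n m : Int) (S : Finset (Int × Int)) :
    (pvMkV n m S).length = n.toNat := by simp [pvMkV]

lemma pvMkV_get {n m a b : Int} (S : Finset (Int × Int))
    (h1 : 0 ≤ a) (h2 : a < n) (h3 : 0 ≤ b) (h4 : b < m) :
    pvGetV (pvMkV n m S) a b = if (a, b) ∈ S then 1 else 0 := by
  have hpair : ((a.toNat : Int), (b.toNat : Int)) = (a, b) := by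
    rw [Int.toNat_of_nonneg h1, Int.toNat_of_nonneg h3]
  unfold pvGetV
  rw [PySem.List.pyGetD_eq_getElem _ _ h1 (by rw [pvMkV_length]; omega)]
  have hrow : (pvMkV n m S)[a.toNat]'(by rw [pvMkV_length]; omega)
      = (List.range m.toNat).map
          (fun (j : Nat) => if ((a.toNat : Int), (j : Int)) ∈ S then 1 else 0) := by
    unfold pvMkV
    simp only [List.getElem_map, List.getElem_range]
  rw [hrow]
  rw [PySem.List.pyGetD_eq_getElem _ _ h3 (by simp; omega)]
  simp only [List.getElem_map, List.getElem_range]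
  rw [hpair]

lemma pvMkV_row (n m : Int) (T : Finset (Int × Int)) (i : Nat)
    (hi : i < (pvMkV n m T).length) :
    (pvMkV n m T)[i] = (List.range m.toNat).map
      (fun (j : Nat) => if ((i : Int), (j : Int)) ∈ T then 1 else 0) := by
  unfold pvMkV at hi ⊢
  simp only [List.getElem_map, List.getElem_range]

lemma pvMkV_set {n m a b : Int} (S : Finset (Int × Int))
    (h1 : 0 ≤ a) (h2 : a < n) (h3 : 0 ≤ b) (h4 : b < m) :
    pvSetV (pvMkV n m S) a b = pvMkV n m (insert (a, b) S) := by
  have hpair : ((a.toNat : Int), (b.toNat : Int)) = (a, b) := by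
    rw [Int.toNat_of_nonneg h1, Int.toNat_of_nonneg h3]
  unfold pvSetV
  rw [PySem.List.pySetD_of_nonneg _ _ h1, PySem.List.pySetD_of_nonneg _ _ h3,
    PySem.List.pyGetD_eq_getElem _ _ h1 (by rw [pvMkV_length]; omega)]
  apply List.ext_getElem
  · simp only [List.length_set, pvMkV_length]
  · intro i hi1 hi2
    rw [List.getElem_set, pvMkV_row n m (insert (a, b) S) i hi2]
    by_cases hia : a.toNat = i
    · rw [if_pos hia]
      subst hia
      rw [pvMkV_row n m S a.toNat (by rw [pvMkV_length]; omega)]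
      apply List.ext_getElem
      · simp only [List.length_set, List.length_map]
      · intro j hj1 hj2
        rw [List.getElem_set]
        simp only [List.getElem_map, List.getElem_range]
        by_cases hjb : b.toNat = j
        · subst hjb
          rw [if_pos rfl, hpair, if_pos (Finset.mem_insert_self _ _)]
        · rw [if_neg hjb]
          have hjb' : (j : Int) ≠ b := by omega
          simp [Finset.mem_insert, hjb']
    · rw [if_neg hia]
      have hi : i < n.toNat := by
        have := hi1
        rw [List.length_set, pvMkV_length] at this
        exact this
      rw [pvMkV_row n m S i (by rw [pvMkV_length]; omega)]
      apply List.map_congr_left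
      intro j _
      have hne : ((i : Int), (j : Int)) ≠ (a, b) := by
        simp only [ne_eq, Prod.mk.injEq, not_and]
        intro hh
        exfalso
        omega
      simp [Finset.mem_insert, hne]

lemma pvMkV_init (n m : Int) :
    (PySem.List.pyRange 0 n 1).map (fun _ => (PySem.List.pyRange 0 m 1).map (fun _ => (0 : Int)))
      = pvMkV n m ∅ := by
  simp only [pvMkV, Finset.notMem_empty, if_false, List.map_const',
    PySem.List.length_pyRange_one, List.length_range]
  norm_num

-- the A-side scan is the abstract step on the denoted set

lemma pvDirs_map (x y : Int) :
    pvDirs.map (fun d => (x + d.1, y + d.2)) = pvNbrs x y := by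
  simp only [pvDirs, pvNbrs, List.map_cons, List.map_nil, List.cons.injEq, Prod.mk.injEq,
    and_true]
  norm_num
  omega

lemma scanGen (land : List (List Int)) (n m : Int) :
    ∀ (L : List (Int × Int)) (S : Finset (Int × Int)) (q : List (Int × Int)),
    L.foldl (fun (vq : List (List Int) × List (Int × Int)) c =>
        if c.1 < 0 ∨ c.2 < 0 ∨ c.1 ≥ n ∨ c.2 ≥ m then vq
        else if pvGetV vq.1 c.1 c.2 = 0 ∧ pvLandAt land c.1 c.2 = 1 then
          (pvSetV vq.1 c.1 c.2, vq.2 ++ [c])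
        else vq) (pvMkV n m S, q)
      = (pvMkV n m (L.foldl (pvStepG land n m) (S, q)).1,
         (L.foldl (pvStepG land n m) (S, q)).2) := by
  intro L
  induction L with
  | nil => intro S q; rfl
  | cons c L ih =>
    intro S q
    rw [List.foldl_cons, List.foldl_cons]
    by_cases hb : c.1 < 0 ∨ c.2 < 0 ∨ c.1 ≥ n ∨ c.2 ≥ m
    · rw [if_pos hb]
      have hG : pvStepG land n m (S, q) c = (S, q) := by
        simp only [pvStepG]
        rw [if_neg]
        rintro ⟨⟨hh1, hh2, hh3, hh4, _⟩, _⟩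
        omega
      rw [hG]
      exact ih S q
    · push_neg at hb
      obtain ⟨hb1, hb2, hb3, hb4⟩ := hb
      rw [if_neg (by omega)]
      have hget : pvGetV (pvMkV n m S) c.1 c.2 = if (c.1, c.2) ∈ S then 1 else 0 :=
        pvMkV_get S (by omega) (by omega) (by omega) (by omega)
      by_cases hmem : c ∈ S
      · have : pvGetV (pvMkV n m S) c.1 c.2 = 1 := by rw [hget, if_pos (by simpa using hmem)]
        rw [if_neg (by rw [this]; rintro ⟨hh, _⟩; norm_num at hh)]
        have hG : pvStepG land n m (S, q) c = (S, q) := by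
          simp only [pvStepG]
          rw [if_neg (by rintro ⟨_, hns⟩; exact hns hmem)]
        rw [hG]
        exact ih S q
      · have hget0 : pvGetV (pvMkV n m S) c.1 c.2 = 0 := by
          rw [hget, if_neg (by simpa using hmem)]
        by_cases hland : pvLandAt land c.1 c.2 = 1
        · rw [if_pos ⟨hget0, hland⟩]
          have hG : pvStepG land n m (S, q) c = (insert c S, q ++ [c]) := by
            simp only [pvStepG]
            rw [if_pos ⟨⟨by omega, by omega, by omega, by omega, hland⟩, hmem⟩]
          rw [hG]
          have hset : pvSetV (pvMkV n m S) c.1 c.2 = pvMkV n m (insert c S) := by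
            rw [pvMkV_set S (by omega) (by omega) (by omega) (by omega)]
          rw [hset]
          exact ih (insert c S) (q ++ [c])
        · rw [if_neg (by rintro ⟨_, hl⟩; exact hland hl)]
          have hG : pvStepG land n m (S, q) c = (S, q) := by
            simp only [pvStepG]
            rw [if_neg (by rintro ⟨⟨_, _, _, _, hl⟩, _⟩; exact hland hl)]
          rw [hG]
          exact ih S q

lemma scanA_couple (land : List (List Int)) (n m x y : Int)
    (S : Finset (Int × Int)) (q : List (Int × Int)) :
    pvScanA land n m x y (pvMkV n m S, q) =
      (pvMkV n m ((pvNbrs x y).foldl (pvStepG land n m) (S, q)).1,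
       ((pvNbrs x y).foldl (pvStepG land n m) (S, q)).2) := by
  have h := scanGen land n m (pvNbrs x y) S q
  rw [← h, ← pvDirs_map x y, List.foldl_map]
  rfl

lemma pvPopF_perm (c : Int × Int) (t : List (Int × Int)) :
    ((pvPopF (c :: t)).1 :: (pvPopF (c :: t)).2).Perm (c :: t) := by
  simp [pvPopF]

lemma getLastD_cons_eq (c : Int × Int) (t : List (Int × Int)) :
    (c :: t).getLastD (0, 0) = (c :: t).getLast (by simp) := by
  rw [List.getLastD_eq_getLast?, List.getLast?_eq_some_getLast (by simp)]
  rfl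

lemma pvPopB_perm (c : Int × Int) (t : List (Int × Int)) :
    ((pvPopB (c :: t)).1 :: (pvPopB (c :: t)).2).Perm (c :: t) := by
  show ((c :: t).getLastD (0, 0) :: (c :: t).dropLast).Perm (c :: t)
  rw [getLastD_cons_eq]
  have h1 : ((c :: t).getLast (by simp) :: (c :: t).dropLast).Perm
      ((c :: t).dropLast ++ [(c :: t).getLast (by simp)]) :=
    (List.perm_append_singleton _ _).symm
  have h2 : (c :: t).dropLast ++ [(c :: t).getLast (by simp)] = c :: t :=
    List.dropLast_append_getLast (by simp)
  rw [h2] at h1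
  exact h1

lemma bridgeA (land : List (List Int)) (n m : Int) :
    ∀ (fuel : Nat) (S : Finset (Int × Int)) (q : List (Int × Int)) (cnt mn mx : Int),
    pvBFSLoop land n m fuel (pvMkV n m S) q cnt mn mx =
      (pvMkV n m (pvGLoop land n m pvPopF fuel S q []).1,
       cnt + ((pvGLoop land n m pvPopF fuel S q []).2.length : Int),
       (pvGLoop land n m pvPopF fuel S q []).2.foldl (fun a c => min a c.2) mn,
       (pvGLoop land n m pvPopF fuel S q []).2.foldl (fun a c => max a c.2) mx) := by
  intro fuel
  induction fuel with
  | zero => intro S q cnt mn mx; simp [pvBFSLoop, pvGLoop]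
  | succ fuel ih =>
    intro S q cnt mn mx
    cases q with
    | nil => simp [pvBFSLoop, pvGLoop]
    | cons hd t =>
      obtain ⟨x, y⟩ := hd
      have hpop : pvPopF ((x, y) :: t) = ((x, y), t) := rfl
      simp only [pvBFSLoop, pvGLoop, hpop]
      rw [scanA_couple, ih]
      rw [gloop_factor land n m pvPopF fuel _ _ ([] ++ [((x, y), t).1])]
      simp only [List.nil_append, List.singleton_append, List.foldl_cons, List.length_cons]
      refine Prod.ext rfl (Prod.ext ?_ (Prod.ext rfl rfl))
      push_cast
      omega

lemma scanGenB (land : List (List Int)) (n m : Int) :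
    ∀ (L : List (Int × Int)) (S : Finset (Int × Int)) (seen : PySem.Set (Int × Int))
      (st : List (Int × Int)),
    (∀ x, x ∈ seen ↔ x ∈ S) →
    ∃ seen' : PySem.Set (Int × Int),
      L.foldl (fun (ss : PySem.Set (Int × Int) × List (Int × Int)) c =>
          if 0 ≤ c.1 ∧ c.1 < n ∧ 0 ≤ c.2 ∧ c.2 < m ∧ c ∉ ss.1 ∧ pvLandAt land c.1 c.2 = 1 then
            (PySem.Set.add ss.1 c, ss.2 ++ [c])
          else ss) (seen, st)
        = (seen', (L.foldl (pvStepG land n m) (S, st)).2)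
      ∧ (∀ x, x ∈ seen' ↔ x ∈ (L.foldl (pvStepG land n m) (S, st)).1) := by
  intro L
  induction L with
  | nil => intro S seen st hs; exact ⟨seen, rfl, hs⟩
  | cons c L ih =>
    intro S seen st hs
    rw [List.foldl_cons, List.foldl_cons]
    by_cases hc : (0 ≤ c.1 ∧ c.1 < n ∧ 0 ≤ c.2 ∧ c.2 < m ∧ pvLandAt land c.1 c.2 = 1) ∧ c ∉ S
    · rw [if_pos (by
        refine ⟨hc.1.1, hc.1.2.1, hc.1.2.2.1, hc.1.2.2.2.1, ?_, hc.1.2.2.2.2⟩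
        intro hmem
        exact hc.2 ((hs c).mp hmem))]
      have hG : pvStepG land n m (S, st) c = (insert c S, st ++ [c]) := by
        simp only [pvStepG]; rw [if_pos hc]
      rw [hG]
      exact ih (insert c S) (PySem.Set.add seen c) (st ++ [c]) (by
        intro z
        rw [PySem.Set.mem_add, hs z, Finset.mem_insert]
        tauto)
    · have hG : pvStepG land n m (S, st) c = (S, st) := by
        simp only [pvStepG]; rw [if_neg hc]
      rw [hG, if_neg (by
        rintro ⟨hh1, hh2, hh3, hh4, hh5, hh6⟩
        exact hc ⟨⟨hh1, hh2, hh3, hh4, hh6⟩, fun hmem => hh5 ((hs c).mpr hmem)⟩)]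
      exact ih S seen st hs

lemma bridgeB (land : List (List Int)) (n m : Int) :
    ∀ (fuel : Nat) (S : Finset (Int × Int)) (seen : PySem.Set (Int × Int))
      (st : List (Int × Int)) (cols : List Int),
    (∀ x, x ∈ seen ↔ x ∈ S) →
    ∃ seen', pvDFSLoop land n m fuel seen st cols =
        (seen', cols ++ (pvGLoop land n m pvPopB fuel S st []).2.map (fun c => c.2)) ∧
      (∀ x, x ∈ seen' ↔ x ∈ (pvGLoop land n m pvPopB fuel S st []).1) := by
  intro fuel
  induction fuel with
  | zero => intro S seen st cols hs; exact ⟨seen, by simp [pvDFSLoop, pvGLoop], by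
      simpa [pvGLoop] using hs⟩
  | succ fuel ih =>
    intro S seen st cols hs
    cases st with
    | nil => exact ⟨seen, by simp [pvDFSLoop, pvGLoop], by simpa [pvGLoop] using hs⟩
    | cons c t =>
      have hpB : pvPopB (c :: t) = ((c :: t).getLast (by simp), (c :: t).dropLast) := by
        unfold pvPopB
        rw [getLastD_cons_eq]
      obtain ⟨seen1, hfold, hseen1⟩ :=
        scanGenB land n m (pvNbrs ((c :: t).getLast (by simp)).1 ((c :: t).getLast (by simp)).2)
          S seen ((c :: t).dropLast) hs
      obtain ⟨seen', hrec, hseen'⟩ := ih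
        ((pvNbrs ((c :: t).getLast (by simp)).1 ((c :: t).getLast (by simp)).2).foldl
          (pvStepG land n m) (S, (c :: t).dropLast)).1
        seen1
        ((pvNbrs ((c :: t).getLast (by simp)).1 ((c :: t).getLast (by simp)).2).foldl
          (pvStepG land n m) (S, (c :: t).dropLast)).2
        (cols ++ [((c :: t).getLast (by simp)).2]) hseen1
      refine ⟨seen', ?_, ?_⟩
      · simp only [pvDFSLoop]
        rw [hfold, hrec]
        simp only [pvGLoop, hpB]
        rw [gloop_factor land n m pvPopB fuel _ _ ([] ++ [((c :: t).getLast (by simp))])]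
        simp
      · simp only [pvGLoop, hpB] at hseen' ⊢
        rw [gloop_factor land n m pvPopB fuel _ _ ([] ++ [((c :: t).getLast (by simp))])]
        exact hseen'

-- order-independent extremal values

lemma minfold_eq {a₁ a₂ : Int} {l₁ l₂ : List Int}
    (hm : ∀ x, x ∈ a₁ :: l₁ ↔ x ∈ a₂ :: l₂) :
    l₁.foldl min a₁ = l₂.foldl min a₂ := by
  obtain ⟨hle1, hall1⟩ := PySem.List.foldl_min_le l₁ a₁
  obtain ⟨hle2, hall2⟩ := PySem.List.foldl_min_le l₂ a₂
  have hm1 : l₁.foldl min a₁ ∈ a₁ :: l₁ := by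
    rcases PySem.List.foldl_min_mem l₁ a₁ with h | h
    · rw [h]; simp
    · exact List.mem_cons_of_mem _ h
  have hm2 : l₂.foldl min a₂ ∈ a₂ :: l₂ := by
    rcases PySem.List.foldl_min_mem l₂ a₂ with h | h
    · rw [h]; simp
    · exact List.mem_cons_of_mem _ h
  have hle12 : ∀ x ∈ a₁ :: l₁, l₁.foldl min a₁ ≤ x := by
    intro x hx
    rcases List.mem_cons.mp hx with rfl | hx
    · exact hle1
    · exact hall1 x hx
  have hle22 : ∀ x ∈ a₂ :: l₂, l₂.foldl min a₂ ≤ x := by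
    intro x hx
    rcases List.mem_cons.mp hx with rfl | hx
    · exact hle2
    · exact hall2 x hx
  exact le_antisymm (hle12 _ ((hm _).mpr hm2)) (hle22 _ ((hm _).mp hm1))

lemma maxfold_eq {a₁ a₂ : Int} {l₁ l₂ : List Int}
    (hm : ∀ x, x ∈ a₁ :: l₁ ↔ x ∈ a₂ :: l₂) :
    l₁.foldl max a₁ = l₂.foldl max a₂ := by
  obtain ⟨hle1, hall1⟩ := PySem.List.le_foldl_max l₁ a₁
  obtain ⟨hle2, hall2⟩ := PySem.List.le_foldl_max l₂ a₂
  have hm1 : l₁.foldl max a₁ ∈ a₁ :: l₁ := by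
    rcases PySem.List.foldl_max_mem l₁ a₁ with h | h
    · rw [h]; simp
    · exact List.mem_cons_of_mem _ h
  have hm2 : l₂.foldl max a₂ ∈ a₂ :: l₂ := by
    rcases PySem.List.foldl_max_mem l₂ a₂ with h | h
    · rw [h]; simp
    · exact List.mem_cons_of_mem _ h
  have hge1 : ∀ x ∈ a₁ :: l₁, x ≤ l₁.foldl max a₁ := by
    intro x hx
    rcases List.mem_cons.mp hx with rfl | hx
    · exact hle1
    · exact hall1 x hx
  have hge2 : ∀ x ∈ a₂ :: l₂, x ≤ l₂.foldl max a₂ := by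
    intro x hx
    rcases List.mem_cons.mp hx with rfl | hx
    · exact hle2
    · exact hall2 x hx
  exact le_antisymm (hge2 _ ((hm _).mp hm1)) (hge1 _ ((hm _).mpr hm2))

lemma length_eq_of_nodup_mem_iff {l₁ l₂ : List (Int × Int)}
    (n₁ : l₁.Nodup) (n₂ : l₂.Nodup) (h : ∀ x, x ∈ l₁ ↔ x ∈ l₂) :
    l₁.length = l₂.length := by
  have h' : l₁.toFinset = l₂.toFinset := Finset.ext (fun x => by
    rw [List.mem_toFinset, List.mem_toFinset]; exact h x)
  rw [← List.toFinset_card_of_nodup n₁, ← List.toFinset_card_of_nodup n₂, h']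

-- the result array as per-column sums over the component summaries

lemma pvColSum_append (comps : List (Int × Int × Int)) (t : Int × Int × Int) (col : Int) :
    pvColSum (comps ++ [t]) col =
      if t.2.1 ≤ col ∧ col ≤ t.2.2 then pvColSum comps col + t.1 else pvColSum comps col := by
  simp only [pvColSum, List.filter_append, List.map_append, List.sum_append]
  by_cases h : t.2.1 ≤ col ∧ col ≤ t.2.2 <;> simp [h]

lemma set_map_range (m a x : Int) (f : Int → Int) (h0 : 0 ≤ a) (h1 : a < m) :
    PySem.List.pySetD ((PySem.List.pyRange 0 m 1).map f) a x
      = (PySem.List.pyRange 0 m 1).map (fun col => if col = a then x else f col) := by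
  rw [PySem.List.pySetD_of_nonneg _ _ h0]
  apply List.ext_getElem
  · simp
  · intro idx hidx1 hidx2
    rw [List.getElem_set]
    simp only [List.getElem_map]
    have hlen : idx < (PySem.List.pyRange 0 m 1).length := by
      simpa using hidx2
    have hval : (PySem.List.pyRange 0 m 1)[idx]'hlen = (0 : Int) + idx :=
      PySem.List.getElem_pyRange_one _ _ _ _
    by_cases hia : a.toNat = idx
    · have hv : (PySem.List.pyRange 0 m 1)[idx]'hlen = a := by rw [hval]; omega
      rw [if_pos hia, hv, if_pos rfl]
    · have hv : ¬((PySem.List.pyRange 0 m 1)[idx]'hlen = a) := by rw [hval]; omega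
      rw [if_neg hia, if_neg hv]

lemma addRange_aux (m mx k : Int) (h1 : mx < m) :
    ∀ (d : Nat) (a : Int), 0 ≤ a → (mx + 1 - a).toNat = d →
    ∀ f : Int → Int,
    (PySem.List.pyRange a (mx + 1) 1).foldl
        (fun res i => PySem.List.pySetD res i (PySem.List.pyGetD res i 0 + k))
        ((PySem.List.pyRange 0 m 1).map f)
      = (PySem.List.pyRange 0 m 1).map
          (fun col => if a ≤ col ∧ col ≤ mx then f col + k else f col) := by
  intro d
  induction d with
  | zero =>
    intro a ha hd f
    have hnil : PySem.List.pyRange a (mx + 1) 1 = [] :=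
      PySem.List.pyRange_one_eq_nil (by omega)
    rw [hnil, List.foldl_nil]
    apply List.map_congr_left
    intro col _
    rw [if_neg (by omega)]
  | succ d ihd =>
    intro a ha hd f
    have hcons : PySem.List.pyRange a (mx + 1) 1 = a :: PySem.List.pyRange (a + 1) (mx + 1) 1 :=
      PySem.List.pyRange_one_cons (by omega)
    rw [hcons, List.foldl_cons]
    have hget : PySem.List.pyGetD ((PySem.List.pyRange 0 m 1).map f) a 0 = f a :=
      PySem.List.pyGetD_map_pyRange_of_nonneg f m a 0 ha (by omega)
    rw [hget, set_map_range m a (f a + k) f ha (by omega)]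
    rw [ihd (a + 1) (by omega) (by omega) _]
    apply List.map_congr_left
    intro col _
    by_cases hca : col = a
    · rw [if_neg (by omega), if_pos hca, if_pos (show a ≤ col ∧ col ≤ mx by omega), hca]
    · simp only [if_neg hca]
      by_cases hcr : a + 1 ≤ col ∧ col ≤ mx
      · rw [if_pos hcr, if_pos (by omega)]
      · rw [if_neg hcr, if_neg (by omega)]

lemma addRange_map (m mn mx k : Int) (f : Int → Int) (h0 : 0 ≤ mn) (h1 : mx < m) :
    pvAddRange ((PySem.List.pyRange 0 m 1).map f) mn mx k =
      (PySem.List.pyRange 0 m 1).map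
        (fun col => if mn ≤ col ∧ col ≤ mx then f col + k else f col) := by
  exact addRange_aux m mx k h1 (mx + 1 - mn).toNat mn h0 rfl f
-- the joint outer-loop invariant
structure pvOutInv (land : List (List Int)) (n m : Int) (S : Finset (Int × Int))
    (seen : PySem.Set (Int × Int)) : Prop where
  hseen : ∀ x, x ∈ seen ↔ x ∈ S
  hclosed : ∀ a ∈ S, ∀ b, pvAdj a b → pvO land n m b → b ∈ S

lemma innerBridge (land : List (List Int)) (n m : Int) :
    ∀ (js : List Int), (∀ j ∈ js, 0 ≤ j ∧ j < m) →
    ∀ (i : Int), 0 ≤ i → i < n →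
    ∀ (S : Finset (Int × Int)) (seen : PySem.Set (Int × Int)) (comps : List (Int × Int × Int)),
    pvOutInv land n m S seen →
    ∃ S' seen' comps',
      js.foldl (fun (vr : List (List Int) × List Int) j =>
          if pvGetV vr.1 i j = 0 ∧ pvLandAt land i j = 1 then
            ((pvBFS land n m i j vr.1).1,
             pvAddRange vr.2 (pvBFS land n m i j vr.1).2.2.1 (pvBFS land n m i j vr.1).2.2.2
               (pvBFS land n m i j vr.1).2.1)
          else vr)
        (pvMkV n m S, (PySem.List.pyRange 0 m 1).map (pvColSum comps)) =
        (pvMkV n m S', (PySem.List.pyRange 0 m 1).map (pvColSum comps')) ∧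
      js.foldl (fun (sc : PySem.Set (Int × Int) × List (Int × Int × Int)) j =>
          if (i, j) ∉ sc.1 ∧ pvLandAt land i j = 1 then
            ((pvDFSLoop land n m (n.toNat * m.toNat + 1)
                (PySem.Set.add sc.1 (i, j)) [(i, j)] []).1,
             sc.2 ++ [(((pvDFSLoop land n m (n.toNat * m.toNat + 1)
                  (PySem.Set.add sc.1 (i, j)) [(i, j)] []).2.length : Int),
               (PySem.List.min? (pvDFSLoop land n m (n.toNat * m.toNat + 1)
                  (PySem.Set.add sc.1 (i, j)) [(i, j)] []).2 (fun y => y)).getD 0,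
               (PySem.List.max? (pvDFSLoop land n m (n.toNat * m.toNat + 1)
                  (PySem.Set.add sc.1 (i, j)) [(i, j)] []).2 (fun y => y)).getD 0)])
          else sc) (seen, comps) = (seen', comps') ∧
      pvOutInv land n m S' seen' := by
  intro js
  induction js with
  | nil =>
    intro _ i _ _ S seen comps inv
    exact ⟨S, seen, comps, rfl, rfl, inv⟩
  | cons j js ih =>
    intro hb i hi0 hin S seen comps inv
    obtain ⟨hj0, hjm⟩ := hb j List.mem_cons_self
    have hb' : ∀ j' ∈ js, 0 ≤ j' ∧ j' < m := fun j' hj' => hb j' (List.mem_cons_of_mem _ hj')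
    by_cases hcond : (i, j) ∉ S ∧ pvLandAt land i j = 1
    · obtain ⟨hnotS, hland⟩ := hcond
      have hOs : pvO land n m (i, j) := ⟨hi0, hin, hj0, hjm, hland⟩
      have hgrid : (i, j) ∈ pvGrid n m := pvO_grid hOs
      have hcardlt : (pvGrid n m \ insert (i, j) S).card < n.toNat * m.toNat := by
        have hsub : pvGrid n m \ insert (i, j) S ⊂ pvGrid n m := by
          rw [Finset.ssubset_iff_of_subset Finset.sdiff_subset]
          exact ⟨(i, j), hgrid, by simp⟩
        have := Finset.card_lt_card hsub
        rwa [card_pvGrid] at this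
      have hinv0 : pvInv land n m S (i, j) (insert (i, j) S) [(i, j)] [] := by
        constructor
        · intro x hx
          have hxe : x = (i, j) := by simpa using hx
          rw [hxe]; exact Finset.mem_insert_self _ _
        · simp
        · intro x
          rw [Finset.mem_insert]
          constructor
          · rintro (rfl | hx)
            · exact Or.inr (Or.inr (by simp))
            · exact Or.inl hx
          · rintro (hx | hx | hx)
            · exact Or.inr hx
            · simp at hx
            · exact Or.inl (by simpa using hx)
        · intro x hx
          have hxe : x = (i, j) := by simpa using hx
          rw [hxe]; exact hnotS
        · intro x hx
          simp at hx
        · intro x hx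
          have hxe : x = (i, j) := by simpa using hx
          rw [hxe]; exact Relation.ReflTransGen.refl
        · intro x hx
          have hxe : x = (i, j) := by simpa using hx
          rw [hxe]; exact hOs
        · exact Finset.mem_insert_self _ _
      obtain ⟨SfA, PA, hrunA, hndA, hPAiff, hSAiff⟩ :=
        gloop_spec land n m S (i, j) pvPopF pvPopF_perm inv.hclosed hnotS hOs
          (n.toNat * m.toNat + 1) (insert (i, j) S) [(i, j)] [] hinv0
          (by simp only [List.length_cons, List.length_nil]; omega)
      obtain ⟨SfB, PB, hrunB, hndB, hPBiff, hSBiff⟩ :=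
        gloop_spec land n m S (i, j) pvPopB pvPopB_perm inv.hclosed hnotS hOs
          (n.toNat * m.toNat + 1) (insert (i, j) S) [(i, j)] [] hinv0
          (by simp only [List.length_cons, List.length_nil]; omega)
      have hAval : pvBFS land n m i j (pvMkV n m S) =
          (pvMkV n m SfA, 0 + (PA.length : Int),
           PA.foldl (fun acc c => min acc c.2) j,
           PA.foldl (fun acc c => max acc c.2) j) := by
        unfold pvBFS
        rw [pvMkV_set S hi0 hin hj0 hjm, bridgeA, hrunA]
      obtain ⟨seenB, hBrun, hseenB⟩ := bridgeB land n m (n.toNat * m.toNat + 1)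
        (insert (i, j) S) (PySem.Set.add seen (i, j)) [(i, j)] []
        (by
          intro x
          rw [PySem.Set.mem_add, inv.hseen x, Finset.mem_insert]
          tauto)
      rw [hrunB] at hBrun hseenB
      have hmemP : ∀ x, x ∈ PA ↔ x ∈ PB := fun x => (hPAiff x).trans (hPBiff x).symm
      have hsPA : (i, j) ∈ PA := (hPAiff _).mpr Relation.ReflTransGen.refl
      have hsPB : (i, j) ∈ PB := (hPBiff _).mpr Relation.ReflTransGen.refl
      have hlenP : PA.length = PB.length := length_eq_of_nodup_mem_iff hndA hndB hmemP
      have hcols : ∀ z : Int, z ∈ PA.map (fun c => c.2) ↔ z ∈ PB.map (fun c => c.2) := by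
        intro z
        simp only [List.mem_map]
        constructor
        · rintro ⟨cc, hcc, rfl⟩; exact ⟨cc, (hmemP cc).mp hcc, rfl⟩
        · rintro ⟨cc, hcc, rfl⟩; exact ⟨cc, (hmemP cc).mpr hcc, rfl⟩
      have hjA : j ∈ PA.map (fun c => c.2) := List.mem_map.mpr ⟨(i, j), hsPA, rfl⟩
      obtain ⟨z0, zt, hz⟩ : ∃ z0 zt, PB.map (fun c => c.2) = z0 :: zt := by
        cases hPBm : PB.map (fun c => c.2) with
        | nil =>
          exfalso
          have hjB : j ∈ PB.map (fun c => c.2) := List.mem_map.mpr ⟨(i, j), hsPB, rfl⟩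
          rw [hPBm] at hjB
          simp at hjB
        | cons z0 zt => exact ⟨z0, zt, rfl⟩
      have hminiff : ∀ z : Int, z ∈ j :: PA.map (fun c => c.2) ↔ z ∈ z0 :: zt := by
        intro z
        rw [← hz, List.mem_cons]
        constructor
        · rintro (rfl | hzz)
          · exact (hcols _).mp hjA
          · exact (hcols _).mp hzz
        · intro hzz
          exact Or.inr ((hcols _).mpr hzz)
      have hminA : PA.foldl (fun acc c => min acc c.2) j
          = (PA.map (fun c => c.2)).foldl min j := by rw [List.foldl_map]
      have hmaxA : PA.foldl (fun acc c => max acc c.2) j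
          = (PA.map (fun c => c.2)).foldl max j := by rw [List.foldl_map]
      have hmin : (PySem.List.min? (([] : List Int) ++ PB.map (fun c => c.2))
            (fun y => y)).getD 0 = PA.foldl (fun acc c => min acc c.2) j := by
        rw [List.nil_append, hz, PySem.List.min?_id_cons, Option.getD_some, hminA]
        exact (minfold_eq hminiff).symm
      have hmax : (PySem.List.max? (([] : List Int) ++ PB.map (fun c => c.2))
            (fun y => y)).getD 0 = PA.foldl (fun acc c => max acc c.2) j := by
        rw [List.nil_append, hz, PySem.List.max?_id_cons, Option.getD_some, hmaxA]
        exact (maxfold_eq hminiff).symm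
      have hcnt : ((([] : List Int) ++ PB.map (fun c => c.2)).length : Int)
          = 0 + (PA.length : Int) := by
        simp [List.length_map, hlenP]
      have hcondA : pvGetV (pvMkV n m S) i j = 0 ∧ pvLandAt land i j = 1 := by
        rw [pvMkV_get S hi0 hin hj0 hjm, if_neg hnotS]
        exact ⟨rfl, hland⟩
      have hcondB : (i, j) ∉ seen ∧ pvLandAt land i j = 1 :=
        ⟨fun h => hnotS ((inv.hseen _).mp h), hland⟩
      -- bounds of the column extrema
      have hcolsO : ∀ z ∈ PA.map (fun c => c.2), 0 ≤ z ∧ z < m := by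
        intro z hzz
        obtain ⟨cc, hcc, rfl⟩ := List.mem_map.mp hzz
        have hOc : pvO land n m cc := pvReach_O hOs ((hPAiff cc).mp hcc)
        exact ⟨hOc.2.2.1, hOc.2.2.2.1⟩
      have hmn0 : 0 ≤ PA.foldl (fun acc c => min acc c.2) j := by
        rw [hminA]
        rcases PySem.List.foldl_min_mem (PA.map (fun c => c.2)) j with h | h
        · rw [h]; exact hj0
        · exact (hcolsO _ h).1
      have hmxm : PA.foldl (fun acc c => max acc c.2) j < m := by
        rw [hmaxA]
        rcases PySem.List.foldl_max_mem (PA.map (fun c => c.2)) j with h | h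
        · rw [h]; exact hjm
        · exact (hcolsO _ h).2
      have hSfeq : ∀ x, x ∈ seenB ↔ x ∈ SfA :=
        fun x => (hseenB x).trans ((hSBiff x).trans (hSAiff x).symm)
      have hclosedA : ∀ a ∈ SfA, ∀ b, pvAdj a b → pvO land n m b → b ∈ SfA := by
        intro a ha b hadj hOb
        rcases (hSAiff a).mp ha with h | h
        · exact (hSAiff b).mpr (Or.inl (inv.hclosed a h b hadj hOb))
        · exact (hSAiff b).mpr (Or.inr (h.tail ⟨hadj, hOb⟩))
      simp only [List.foldl_cons]
      rw [if_pos hcondA, if_pos hcondB, hAval, hBrun]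
      dsimp only
      rw [addRange_map m _ _ _ (pvColSum comps) hmn0 hmxm]
      have hmapA : (PySem.List.pyRange 0 m 1).map
            (fun col => if PA.foldl (fun acc c => min acc c.2) j ≤ col ∧
                col ≤ PA.foldl (fun acc c => max acc c.2) j
              then pvColSum comps col + (0 + (PA.length : Int)) else pvColSum comps col)
          = (PySem.List.pyRange 0 m 1).map
              (pvColSum (comps ++ [(0 + (PA.length : Int),
                PA.foldl (fun acc c => min acc c.2) j,
                PA.foldl (fun acc c => max acc c.2) j)])) := by
        apply List.map_congr_left
        intro col _
        rw [pvColSum_append]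
      rw [hmapA, hcnt, hmin, hmax]
      exact ih hb' i hi0 hin SfA seenB
        (comps ++ [(0 + (PA.length : Int),
          PA.foldl (fun acc c => min acc c.2) j,
          PA.foldl (fun acc c => max acc c.2) j)]) ⟨hSfeq, hclosedA⟩
    · have hA : ¬(pvGetV (pvMkV n m S) i j = 0 ∧ pvLandAt land i j = 1) := by
        rw [pvMkV_get S hi0 hin hj0 hjm]
        by_cases hmem : (i, j) ∈ S
        · rw [if_pos hmem]
          rintro ⟨h0, _⟩
          norm_num at h0
        · rw [if_neg hmem]
          rintro ⟨_, hl⟩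
          exact hcond ⟨hmem, hl⟩
      have hB : ¬((i, j) ∉ seen ∧ pvLandAt land i j = 1) := by
        rintro ⟨hns, hl⟩
        exact hcond ⟨fun hmem => hns ((inv.hseen _).mpr hmem), hl⟩
      simp only [List.foldl_cons]
      rw [if_neg hA, if_neg hB]
      exact ih hb' i hi0 hin S seen comps inv

lemma outerBridge (land : List (List Int)) (n m : Int) :
    ∀ (is : List Int), (∀ i ∈ is, 0 ≤ i ∧ i < n) →
    ∀ (S : Finset (Int × Int)) (seen : PySem.Set (Int × Int)) (comps : List (Int × Int × Int)),
    pvOutInv land n m S seen →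
    ∃ S' seen' comps',
      is.foldl (fun vr i =>
        (PySem.List.pyRange 0 m 1).foldl (fun (vr : List (List Int) × List Int) j =>
          if pvGetV vr.1 i j = 0 ∧ pvLandAt land i j = 1 then
            ((pvBFS land n m i j vr.1).1,
             pvAddRange vr.2 (pvBFS land n m i j vr.1).2.2.1 (pvBFS land n m i j vr.1).2.2.2
               (pvBFS land n m i j vr.1).2.1)
          else vr) vr)
        (pvMkV n m S, (PySem.List.pyRange 0 m 1).map (pvColSum comps)) =
        (pvMkV n m S', (PySem.List.pyRange 0 m 1).map (pvColSum comps')) ∧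
      is.foldl (fun sc i =>
        (PySem.List.pyRange 0 m 1).foldl
          (fun (sc : PySem.Set (Int × Int) × List (Int × Int × Int)) j =>
          if (i, j) ∉ sc.1 ∧ pvLandAt land i j = 1 then
            ((pvDFSLoop land n m (n.toNat * m.toNat + 1)
                (PySem.Set.add sc.1 (i, j)) [(i, j)] []).1,
             sc.2 ++ [(((pvDFSLoop land n m (n.toNat * m.toNat + 1)
                  (PySem.Set.add sc.1 (i, j)) [(i, j)] []).2.length : Int),
               (PySem.List.min? (pvDFSLoop land n m (n.toNat * m.toNat + 1)
                  (PySem.Set.add sc.1 (i, j)) [(i, j)] []).2 (fun y => y)).getD 0,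
               (PySem.List.max? (pvDFSLoop land n m (n.toNat * m.toNat + 1)
                  (PySem.Set.add sc.1 (i, j)) [(i, j)] []).2 (fun y => y)).getD 0)])
          else sc) sc)
        (seen, comps) = (seen', comps') ∧
      pvOutInv land n m S' seen' := by
  intro is hbound
  induction is with
  | nil => intro S seen comps inv; exact ⟨S, seen, comps, rfl, rfl, inv⟩
  | cons i is ih =>
    intro S seen comps inv
    obtain ⟨hi0, hin⟩ := hbound i List.mem_cons_self
    obtain ⟨S1, seen1, comps1, hA1, hB1, inv1⟩ :=
      innerBridge land n m (PySem.List.pyRange 0 m 1)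
        (fun j hj => by
          rw [PySem.List.mem_pyRange_one] at hj; exact hj)
        i hi0 hin S seen comps inv
    obtain ⟨S2, seen2, comps2, hA2, hB2, inv2⟩ :=
      ih (fun j hj => hbound j (List.mem_cons_of_mem _ hj)) S1 seen1 comps1 inv1
    exact ⟨S2, seen2, comps2, by rw [List.foldl_cons, hA1, hA2],
      by rw [List.foldl_cons, hB1, hB2], inv2⟩

-- ===== VERDICT (by name: the statement is the Claim_ definition above) =====
theorem solution_spec : Claim_equal_solution := by
  unfold Claim_equal_solution
  intro land _ _
  unfold Spec_solution
  dsimp only [solution, solution_alt]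
  obtain ⟨S', seen', comps', hA, hB, _⟩ :=
    outerBridge land (land.length : Int) (((PySem.List.pyGet? land 0).getD []).length : Int)
      (PySem.List.pyRange 0 (land.length : Int) 1)
      (fun i hi => by rw [PySem.List.mem_pyRange_one] at hi; exact hi)
      ∅ PySem.Set.empty []
      ⟨fun x => by simp [PySem.Set.empty], fun a ha => absurd ha (Finset.notMem_empty a)⟩
  have hres : (PySem.List.pyRange 0 (((PySem.List.pyGet? land 0).getD []).length : Int) 1).map
        (fun _ => (0 : Int))
      = (PySem.List.pyRange 0 (((PySem.List.pyGet? land 0).getD []).length : Int) 1).map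
        (pvColSum []) :=
    List.map_congr_left (fun col _ => by simp [pvColSum])
  rw [pvMkV_init, hres, hA, hB]
  rfl
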